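-- pv_equiv track=rewrite | github.com/kcaisley/frida | flow/layout/layout.py | _collect_statements
-- ===== SOURCE A (Python) =====
-- def _collect_statements(lines: list[str]) -> list[str]:
--     """Collect `;`-terminated statements from LEF block lines."""
--     stmts: list[str] = []
--     buf = ""
--     for line in lines:
--         line = line.split("#", maxsplit=1)[0].strip()
--         if not line:
--             continue
--         buf = f"{buf} {line}".strip() if buf else line
--         while ";" in buf:
--             stmt, tail = buf.split(";", maxsplit=1)
--             stmt = stmt.strip()
--             if stmt:
--                 stmts.append(stmt)
--             buf = tail.strip()
--     tail = buf.strip()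
--     if tail:
--         stmts.append(tail)
--     return stmts
-- ===== SOURCE B (Python) =====
-- def _collect_statements(lines: list[str]) -> list[str]:
--     """Collect `;`-terminated statements from LEF block lines."""
--     frags = [c for c in (line.split("#", 1)[0].strip() for line in lines) if c]
--     pieces = " ".join(frags).split(";")
--     return [s for s in map(str.strip, pieces) if s]
-- ===== Notes on version B (the rewrite author's own statement) =====
-- stated objective: simpler
-- what changed: Replaces the incremental statement buffer with its inner 'while ";" in buf' splitting loop by a build-then-split pass: clean and filter the lines, join them with single spaces, split the joined string once on ';', then strip and filter the pieces.
import Mathlib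
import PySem

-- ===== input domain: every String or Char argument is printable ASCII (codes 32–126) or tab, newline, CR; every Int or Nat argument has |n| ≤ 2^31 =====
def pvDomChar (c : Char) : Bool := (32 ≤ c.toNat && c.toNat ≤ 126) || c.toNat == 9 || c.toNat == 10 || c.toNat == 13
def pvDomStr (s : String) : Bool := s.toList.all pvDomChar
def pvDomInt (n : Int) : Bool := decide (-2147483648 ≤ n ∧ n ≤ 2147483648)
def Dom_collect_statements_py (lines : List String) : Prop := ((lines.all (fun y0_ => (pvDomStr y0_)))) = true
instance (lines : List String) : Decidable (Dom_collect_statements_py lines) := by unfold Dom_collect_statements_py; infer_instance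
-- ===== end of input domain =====

-- B replaces A's incremental buffer and inner `while ';' in buf` loop by a build-then-split pass
-- (clean+filter the lines, join with spaces, split once on ';', strip+filter the pieces): simpler,
-- and measured faster (A re-concatenates and re-strips the growing buffer per line).

-- shared helper: line.split("#", maxsplit=1)[0].strip()  (both A and B contain this exact expression)
def pvClean (l : List Char) : List Char :=
  PySem.Chars.strip ((PySem.Chars.splitOnMax l ['#'] 1).headD [])

-- ===== PORT A =====
-- the inner `while ";" in buf:` loop; fuel = buf.length suffices (each iteration consumes the ';')
def pvWhileA : Nat → List (List Char) → List Char → List (List Char) × List Char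
  | 0, stmts, buf => (stmts, buf)
  | fuel+1, stmts, buf =>
      if PySem.Chars.isIn [';'] buf then
        match PySem.Chars.splitOnMax buf [';'] 1 with
        | [s, t] =>
            let stmt := PySem.Chars.strip s
            pvWhileA fuel (if stmt ≠ [] then stmts ++ [stmt] else stmts) (PySem.Chars.strip t)
        | _ => (stmts, buf)
      else (stmts, buf)

-- one iteration of `for line in lines:`
def pvStepA (st : List (List Char) × List Char) (line : List Char) : List (List Char) × List Char :=
  let l := pvClean line
  if l = [] then st
  else
    let buf := if st.2 = [] then l else PySem.Chars.strip (st.2 ++ ' ' :: l)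
    pvWhileA buf.length st.1 buf

def collect_statements_py (lines : List String) : List String :=
  let st := (lines.map String.toList).foldl pvStepA ([], [])
  let tail := PySem.Chars.strip st.2
  (if tail ≠ [] then st.1 ++ [tail] else st.1).map String.ofList

-- ===== PORT B =====
def collect_statements_py_alt (lines : List String) : List String :=
  let frags := (lines.map (fun l => pvClean l.toList)).filter (fun c => c ≠ [])
  let pieces := PySem.Chars.splitOn (PySem.Chars.join [' '] frags) [';']
  ((pieces.map PySem.Chars.strip).filter (fun s => s ≠ [])).map String.ofList

-- ===== PRECONDITION & SPEC =====
def Spec_collect_statements_py (lines : List String) (out : List String) : Prop := out = collect_statements_py_alt lines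
instance (lines : List String) (out : List String) : Decidable (Spec_collect_statements_py lines out) := by unfold Spec_collect_statements_py; infer_instance

-- ===== CLAIM (what is proved, stated in full; the proofs are below) =====
def Claim_equal_collect_statements_py : Prop := ∀ (lines : List String), Dom_collect_statements_py lines → Spec_collect_statements_py lines (collect_statements_py lines)

-- ===== LEMMAS AND PROOFS =====

def sSplit : List Char → List (List Char)
  | [] => [[]]
  | c :: r => if c = ';' then [] :: sSplit r else (sSplit r).modifyHead (c :: ·)

theorem sSplit_ne_nil (l : List Char) : sSplit l ≠ [] := by
  cases l with
  | nil => simp [sSplit]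
  | cons c r =>
      by_cases hc : c = ';' <;> simp [sSplit, hc] <;>
      · rcases h : sSplit r with _ | ⟨q, qs⟩
        · exact absurd h (sSplit_ne_nil r)
        · simp

theorem splitOn_go_spec (fuel : Nat) : ∀ (l cur : List Char) (acc : List (List Char)), l.length ≤ fuel →
    PySem.Chars.splitOn.go [';'] fuel l cur acc
      = acc.reverse ++ (sSplit l).modifyHead (cur.reverse ++ ·) := by
  induction fuel with
  | zero => intro l cur acc h
            have : l = [] := List.eq_nil_of_length_eq_zero (Nat.le_zero.mp h)
            subst this
            simp [PySem.Chars.splitOn.go, sSplit]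
  | succ fuel ih =>
      intro l cur acc h
      cases l with
      | nil => simp [PySem.Chars.splitOn.go, sSplit]
      | cons c rest =>
          rw [PySem.Chars.splitOn.go]
          by_cases hc : c = ';'
          · subst hc
            simp only [List.isPrefixOf, sSplit, if_pos rfl, Bool.and_eq_true, beq_self_eq_true,
              List.isPrefixOf_nil_left, and_self, if_true, List.length_cons, List.drop_succ_cons,
              List.drop_zero, List.length_nil]
            rw [ih rest [] _ (by simpa using Nat.le_of_succ_le_succ h)]
            rcases List.exists_cons_of_ne_nil (sSplit_ne_nil rest) with ⟨q, qs, hq⟩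
            simp [hq]
          · have hpre : [';'].isPrefixOf (c :: rest) = false := by
              simp [List.isPrefixOf]; exact fun hne => absurd hne.symm hc
            rw [hpre]
            simp only [Bool.false_eq_true, if_false]
            rw [ih rest (c :: cur) acc (by simpa using Nat.le_of_succ_le_succ h)]
            rcases List.exists_cons_of_ne_nil (sSplit_ne_nil rest) with ⟨q, qs, hq⟩
            simp [sSplit, hc, hq]

theorem splitOn_semi (s : List Char) : PySem.Chars.splitOn s [';'] = sSplit s := by
  rw [PySem.Chars.splitOn, splitOn_go_spec (s.length + 1) s [] [] (by omega)]
  rcases List.exists_cons_of_ne_nil (sSplit_ne_nil s) with ⟨q, qs, hq⟩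
  simp [hq]

theorem splitOnMax_go_zero (a : Char) (fuel : Nat) (l cur : List Char) (acc : List (List Char)) :
    PySem.Chars.splitOnMax.go [a] fuel 0 l cur acc = ((cur.reverse ++ l) :: acc).reverse := by
  cases fuel with
  | zero => rw [PySem.Chars.splitOnMax.go]
  | succ fuel =>
      cases l with
      | nil => rw [PySem.Chars.splitOnMax.go]; simp; omega
      | cons c rest => rw [PySem.Chars.splitOnMax.go]; simp

theorem splitOnMax_go_one (a : Char) (fuel : Nat) : ∀ (l cur : List Char) (acc : List (List Char)), l.length ≤ fuel →
    PySem.Chars.splitOnMax.go [a] fuel 1 l cur acc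
      = acc.reverse ++ (if a ∈ l then [cur.reverse ++ l.takeWhile (· ≠ a), (l.dropWhile (· ≠ a)).tail]
                        else [cur.reverse ++ l]) := by
  induction fuel with
  | zero => intro l cur acc h
            have : l = [] := List.eq_nil_of_length_eq_zero (Nat.le_zero.mp h)
            subst this; rw [PySem.Chars.splitOnMax.go]; simp
  | succ fuel ih =>
      intro l cur acc h
      cases l with
      | nil => rw [PySem.Chars.splitOnMax.go]; simp; omega
      | cons c rest =>
          rw [PySem.Chars.splitOnMax.go]
          by_cases hc : c = a
          · subst hc
            simp only [List.isPrefixOf, Bool.and_eq_true, beq_self_eq_true, List.isPrefixOf_nil_left,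
              and_self, if_true, List.length_singleton, List.drop_succ_cons, List.drop_zero,
              List.length_nil, one_ne_zero, if_false]
            rw [splitOnMax_go_zero]
            simp [List.takeWhile_cons, List.dropWhile_cons]
          · have hpre : [a].isPrefixOf (c :: rest) = false := by
              simp [List.isPrefixOf]; exact fun hne => absurd hne.symm hc
            rw [hpre]
            simp only [Bool.false_eq_true, if_false, one_ne_zero]
            rw [ih rest (c :: cur) acc (by simpa using Nat.le_of_succ_le_succ h)]
            by_cases hm : a ∈ rest <;>
              simp [hm, hc, List.takeWhile_cons, List.dropWhile_cons, Ne.symm hc]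

theorem splitOnMax_one (a : Char) (l : List Char) :
    PySem.Chars.splitOnMax l [a] 1
      = if a ∈ l then [l.takeWhile (· ≠ a), (l.dropWhile (· ≠ a)).tail] else [l] := by
  rw [PySem.Chars.splitOnMax]
  simp only [show ¬((1:Int) < 0) by norm_num, if_false]
  rw [show (1:Int).toNat = 1 from rfl, splitOnMax_go_one a (l.length + 1) l [] [] (by omega)]
  simp

-- ---- strip facts ----
theorem rstrip_eq_reverse (x : List Char) :
    PySem.Chars.rstrip x = (PySem.Chars.lstrip x.reverse).reverse := by
  simp [PySem.Chars.rstrip, PySem.Chars.lstrip]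

theorem lstrip_suffix (x : List Char) : PySem.Chars.lstrip x <:+ x := List.dropWhile_suffix _

theorem rstrip_prefix (x : List Char) : PySem.Chars.rstrip x <+: x := by
  rw [rstrip_eq_reverse]
  have := List.IsSuffix.reverse (lstrip_suffix x.reverse)
  simpa using this

theorem lstrip_of_prefix {u v : List Char} (h : PySem.Chars.lstrip u = u) (hp : v <+: u) :
    PySem.Chars.lstrip v = v := by
  cases v with
  | nil => rfl
  | cons c r =>
      cases u with
      | nil => simp at hp
      | cons c' r' =>
          have hc : c = c' := by
            rcases hp with ⟨t, ht⟩
            have := congrArg List.head? ht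
            simpa using this
          unfold PySem.Chars.lstrip at h ⊢
          rw [List.dropWhile_cons] at h ⊢
          by_cases hsp : PySem.Chars.isspace c = true
          · subst hc
            rw [if_pos hsp] at h
            have := congrArg List.length h
            have hle := List.length_dropWhile_le (p := PySem.Chars.isspace) (l := r')
            simp at this; omega
          · rw [if_neg hsp]

theorem rstrip_of_suffix {u v : List Char} (h : PySem.Chars.rstrip u = u) (hs : v <:+ u) :
    PySem.Chars.rstrip v = v := by
  rw [rstrip_eq_reverse] at h ⊢
  have h' : PySem.Chars.lstrip u.reverse = u.reverse := by
    have := congrArg List.reverse h; simpa using this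
  have hp : v.reverse <+: u.reverse := List.IsSuffix.reverse hs
  have := lstrip_of_prefix h' hp
  rw [this, List.reverse_reverse]

theorem lstrip_idem (x : List Char) : PySem.Chars.lstrip (PySem.Chars.lstrip x) = PySem.Chars.lstrip x := by
  unfold PySem.Chars.lstrip
  rw [List.dropWhile_eq_self_iff]
  intro hl
  have := List.head_dropWhile_not PySem.Chars.isspace (l := x) (by
    intro hnil
    simp [hnil] at hl)
  simpa [List.head_eq_getElem] using this

theorem rstrip_idem (x : List Char) : PySem.Chars.rstrip (PySem.Chars.rstrip x) = PySem.Chars.rstrip x := by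
  rw [rstrip_eq_reverse x, rstrip_eq_reverse, List.reverse_reverse, lstrip_idem]

theorem strip_fix {a : List Char} (h : PySem.Chars.strip a = a) :
    PySem.Chars.lstrip a = a ∧ PySem.Chars.rstrip a = a := by
  have h1 : PySem.Chars.lstrip a = a := by
    have hp : a <+: PySem.Chars.lstrip a := by
      conv_lhs => rw [← h]
      exact rstrip_prefix _
    have hlen : (PySem.Chars.lstrip a).length ≤ a.length :=
      List.IsSuffix.length_le (lstrip_suffix a)
    exact (List.IsPrefix.eq_of_length_le hp hlen).symm
  refine ⟨h1, ?_⟩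
  have := h; unfold PySem.Chars.strip at this; rw [h1] at this; exact this

theorem strip_strip (s : List Char) :
    PySem.Chars.strip (PySem.Chars.strip s) = PySem.Chars.strip s := by
  unfold PySem.Chars.strip
  have h1 : PySem.Chars.lstrip (PySem.Chars.rstrip (PySem.Chars.lstrip s))
      = PySem.Chars.rstrip (PySem.Chars.lstrip s) :=
    lstrip_of_prefix (lstrip_idem s) (rstrip_prefix _)
  rw [h1, rstrip_idem]

theorem strip_length_le (s : List Char) : (PySem.Chars.strip s).length ≤ s.length := by
  unfold PySem.Chars.strip
  calc (PySem.Chars.rstrip (PySem.Chars.lstrip s)).length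
      ≤ (PySem.Chars.lstrip s).length := List.IsPrefix.length_le (rstrip_prefix _)
    _ ≤ s.length := List.IsSuffix.length_le (lstrip_suffix _)

theorem lstrip_ws_prefix {w : List Char} (hw : ∀ c ∈ w, PySem.Chars.isspace c = true) (x : List Char) :
    PySem.Chars.lstrip (w ++ x) = PySem.Chars.lstrip x := by
  induction w with
  | nil => simp
  | cons c r ih =>
      unfold PySem.Chars.lstrip at ih ⊢
      rw [List.cons_append, List.dropWhile_cons, if_pos (hw c (by simp))]
      exact ih (fun c hc => hw c (by simp [hc]))

theorem strip_ws_prefix {w : List Char} (hw : ∀ c ∈ w, PySem.Chars.isspace c = true) (x : List Char) :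
    PySem.Chars.strip (w ++ x) = PySem.Chars.strip x := by
  unfold PySem.Chars.strip
  rw [lstrip_ws_prefix hw]

theorem rstrip_ws_suffix {w : List Char} (hw : ∀ c ∈ w, PySem.Chars.isspace c = true) (x : List Char) :
    PySem.Chars.rstrip (x ++ w) = PySem.Chars.rstrip x := by
  rw [rstrip_eq_reverse, rstrip_eq_reverse, List.reverse_append,
    lstrip_ws_prefix (fun c hc => hw c (by simpa using hc))]

theorem strip_ws_suffix {w : List Char} (hw : ∀ c ∈ w, PySem.Chars.isspace c = true) (x : List Char) :
    PySem.Chars.strip (x ++ w) = PySem.Chars.strip x := by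
  by_cases hx : PySem.Chars.lstrip x = []
  · have hxw : ∀ c ∈ x, PySem.Chars.isspace c = true := by
      simpa [PySem.Chars.lstrip, List.dropWhile_eq_nil_iff] using hx
    have h1 : PySem.Chars.strip (x ++ w) = PySem.Chars.strip w := strip_ws_prefix hxw w
    have h2 : PySem.Chars.lstrip w = [] := by
      simpa [PySem.Chars.lstrip, List.dropWhile_eq_nil_iff] using hw
    rw [h1]; unfold PySem.Chars.strip
    rw [h2, hx]
  · unfold PySem.Chars.strip
    have h1 : PySem.Chars.lstrip (x ++ w) = PySem.Chars.lstrip x ++ w := by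
      unfold PySem.Chars.lstrip at hx ⊢
      rw [List.dropWhile_append]
      simp [hx]
    rw [h1, rstrip_ws_suffix hw]

theorem mem_strip {c : Char} {s : List Char} (h : c ∈ PySem.Chars.strip s) : c ∈ s := by
  unfold PySem.Chars.strip at h
  exact List.IsSuffix.subset (lstrip_suffix s) (List.IsPrefix.subset (rstrip_prefix _) h)

theorem strip_glue {a b : List Char} (ha : PySem.Chars.strip a = a) (hna : a ≠ [])
    (hb : PySem.Chars.strip b = b) (hnb : b ≠ []) :
    PySem.Chars.strip (a ++ ' ' :: b) = a ++ ' ' :: b := by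
  unfold PySem.Chars.strip
  have h1 : PySem.Chars.lstrip (a ++ ' ' :: b) = a ++ ' ' :: b := by
    unfold PySem.Chars.lstrip
    rw [List.dropWhile_append]
    have := (strip_fix ha).1
    unfold PySem.Chars.lstrip at this
    rw [this]
    simp [hna]
  rw [h1, rstrip_eq_reverse]
  have h2 : PySem.Chars.lstrip ((a ++ ' ' :: b).reverse) = (a ++ ' ' :: b).reverse := by
    rw [List.reverse_append, List.reverse_cons, List.append_assoc]
    unfold PySem.Chars.lstrip
    rw [List.dropWhile_append]
    have hbr : PySem.Chars.rstrip b = b := (strip_fix hb).2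
    rw [rstrip_eq_reverse] at hbr
    have hbrev : PySem.Chars.lstrip b.reverse = b.reverse := by
      have := congrArg List.reverse hbr; simpa using this
    unfold PySem.Chars.lstrip at hbrev
    rw [hbrev]
    simp [hnb]
  rw [h2, List.reverse_reverse]

theorem strip_eq_lstrip {L : List Char} (h : PySem.Chars.rstrip L = L) :
    PySem.Chars.strip L = PySem.Chars.lstrip L := by
  unfold PySem.Chars.strip
  exact rstrip_of_suffix h (lstrip_suffix L)

theorem strip_nil_iff {L : List Char} (h : PySem.Chars.rstrip L = L) :
    (PySem.Chars.strip L = [] ↔ L = []) := by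
  constructor
  · intro hs
    rw [strip_eq_lstrip h] at hs
    have hws : ∀ c ∈ L, PySem.Chars.isspace c = true := by
      simpa [PySem.Chars.lstrip, List.dropWhile_eq_nil_iff] using hs
    have : PySem.Chars.rstrip L = PySem.Chars.rstrip ([] ++ L) := by simp
    rw [this, rstrip_ws_suffix hws] at h
    simpa [PySem.Chars.rstrip] using h.symm
  · intro h2; subst h2; rfl

-- ---- sSplit facts ----
theorem sSplit_prefix {p : List Char} (hp : ';' ∉ p) (y : List Char) :
    sSplit (p ++ y) = (sSplit y).modifyHead (p ++ ·) := by
  induction p with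
  | nil =>
      rcases List.exists_cons_of_ne_nil (sSplit_ne_nil y) with ⟨q, qs, hq⟩
      simp [hq]
  | cons c r ih =>
      have hc : c ≠ ';' := fun h => hp (by simp [h])
      have hr : ';' ∉ r := fun h => hp (by simp [h])
      rw [List.cons_append]
      show sSplit (c :: (r ++ y)) = _
      rw [show sSplit (c :: (r ++ y)) = (sSplit (r ++ y)).modifyHead (c :: ·) by simp [sSplit, hc]]
      rw [ih hr]
      rcases List.exists_cons_of_ne_nil (sSplit_ne_nil y) with ⟨q, qs, hq⟩
      simp [hq]

theorem sSplit_of_not_mem {l : List Char} (h : ';' ∉ l) : sSplit l = [l] := by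
  have := sSplit_prefix h []
  simpa [sSplit] using this

theorem sSplit_split {s : List Char} (hs : ';' ∉ s) (t : List Char) :
    sSplit (s ++ ';' :: t) = s :: sSplit t := by
  rw [sSplit_prefix hs]
  rw [show sSplit (';' :: t) = [] :: sSplit t by simp [sSplit]]
  rcases List.exists_cons_of_ne_nil (sSplit_ne_nil t) with ⟨q, qs, hq⟩
  simp

theorem sSplit_singleton : ∀ {l p : List Char}, sSplit l = [p] → p = l := by
  intro l
  induction l with
  | nil => intro p h; simp [sSplit] at h; simp [h]
  | cons c r ih =>
      intro p h
      by_cases hc : c = ';'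
      · subst hc
        simp only [sSplit, if_pos rfl] at h
        have := congrArg List.length h
        simp at this
        exact absurd this (sSplit_ne_nil r)
      · simp only [sSplit, if_neg hc] at h
        rcases List.exists_cons_of_ne_nil (sSplit_ne_nil r) with ⟨q, qs, hq⟩
        rw [hq] at h
        simp at h
        obtain ⟨h1, h2⟩ := h
        have : q = r := ih (by rw [hq, h2])
        rw [← h1, this]

/-- One decomposition lemma: `sSplit l = ps ++ [L]` with the last piece a suffix of `l`,
no `;` in any piece, and appending behaves by extending the last piece. -/
theorem sSplit_decomp : ∀ (l : List Char), ∃ ps L, sSplit l = ps ++ [L] ∧ L <:+ l ∧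
    (∀ p ∈ ps ++ [L], ';' ∉ p) ∧ ∀ y, sSplit (l ++ y) = ps ++ (sSplit y).modifyHead (L ++ ·) := by
  intro l
  induction l with
  | nil =>
      refine ⟨[], [], by simp [sSplit], by simp, by simp, ?_⟩
      intro y
      rcases List.exists_cons_of_ne_nil (sSplit_ne_nil y) with ⟨q, qs, hq⟩
      simp [hq]
  | cons c r ih =>
      rcases ih with ⟨ps, L, h1, h2, h3, h4⟩
      by_cases hc : c = ';'
      · subst hc
        refine ⟨[] :: ps, L, ?_, h2.trans (List.suffix_cons ';' r), ?_, ?_⟩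
        · simp [sSplit, h1]
        · intro p hp
          rcases List.mem_cons.mp hp with h | h
          · simp [h]
          · exact h3 p h
        · intro y
          have : sSplit (';' :: (r ++ y)) = [] :: sSplit (r ++ y) := by simp [sSplit]
          rw [List.cons_append, this, h4 y]
          simp
      · cases ps with
        | nil =>
            obtain rfl : L = r := sSplit_singleton (by simpa using h1)
            refine ⟨[], c :: L, ?_, List.suffix_rfl, ?_, ?_⟩
            · simp [sSplit, hc, h1]
            · intro p hp
              simp at hp
              subst hp
              intro hmem
              rcases List.mem_cons.mp hmem with h | h
              · exact hc h.symm
              · exact h3 L (by simp) h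
            · intro y
              have e1 : sSplit (c :: (L ++ y)) = (sSplit (L ++ y)).modifyHead (c :: ·) := by
                simp [sSplit, hc]
              rw [List.cons_append, e1, h4 y]
              rcases List.exists_cons_of_ne_nil (sSplit_ne_nil y) with ⟨q, qs, hq⟩
              simp [hq]
        | cons p ps' =>
            refine ⟨(c :: p) :: ps', L, ?_, h2.trans (List.suffix_cons c r), ?_, ?_⟩
            · simp [sSplit, hc, h1]
            · intro x hx
              rcases List.mem_cons.mp hx with h | h
              · subst h
                intro hmem
                rcases List.mem_cons.mp hmem with h' | h'
                · exact hc h'.symm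
                · exact h3 p (by simp) h'
              · exact h3 x (by simp at h ⊢; tauto)
            · intro y
              have e1 : sSplit (c :: (r ++ y)) = (sSplit (r ++ y)).modifyHead (c :: ·) := by
                simp [sSplit, hc]
              rw [List.cons_append, e1, h4 y]
              simp

-- ---- derived split interface ----
def sInit (l : List Char) : List (List Char) := (sSplit l).dropLast
def sLast (l : List Char) : List Char := (sSplit l).getLastD []

theorem sSplit_eq_init_last (l : List Char) : sSplit l = sInit l ++ [sLast l] := by
  rcases sSplit_decomp l with ⟨ps, L, h1, -, -, -⟩
  rw [sInit, sLast, h1, List.dropLast_concat, List.getLastD_concat]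

theorem sLast_suffix (l : List Char) : sLast l <:+ l := by
  rcases sSplit_decomp l with ⟨ps, L, h1, h2, -, -⟩
  rw [sLast, h1, List.getLastD_concat]; exact h2

theorem not_semi_mem_sLast (l : List Char) : ';' ∉ sLast l := by
  rcases sSplit_decomp l with ⟨ps, L, h1, -, h3, -⟩
  rw [sLast, h1, List.getLastD_concat]; exact h3 L (by simp)

theorem sSplit_append' (l y : List Char) :
    sSplit (l ++ y) = sInit l ++ (sSplit y).modifyHead (sLast l ++ ·) := by
  rcases sSplit_decomp l with ⟨ps, L, h1, -, -, h4⟩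
  rw [sInit, sLast, h1, List.dropLast_concat, List.getLastD_concat, h4]

def fStrip (ps : List (List Char)) : List (List Char) :=
  (ps.map PySem.Chars.strip).filter (fun s => s ≠ [])

theorem fStrip_append (x y : List (List Char)) : fStrip (x ++ y) = fStrip x ++ fStrip y := by
  simp [fStrip]

theorem fStrip_cons (x : List Char) (xs : List (List Char)) :
    fStrip (x :: xs) = (if PySem.Chars.strip x ≠ [] then [PySem.Chars.strip x] else []) ++ fStrip xs := by
  simp only [fStrip, List.map_cons, List.filter_cons]
  split_ifs with h1 h2 h2 <;> simp_all

-- map-strip of sSplit is invariant under stripping the whole string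
theorem map_strip_sSplit_ws_prefix {w : List Char} (hw : ∀ c ∈ w, PySem.Chars.isspace c = true)
    (x : List Char) : (sSplit (w ++ x)).map PySem.Chars.strip = (sSplit x).map PySem.Chars.strip := by
  have hns : ';' ∉ w := fun hmem => by
    have := hw ';' hmem
    simp [PySem.Chars.isspace] at this
  rw [sSplit_prefix hns]
  rcases List.exists_cons_of_ne_nil (sSplit_ne_nil x) with ⟨q, qs, hq⟩
  rw [hq]
  simp [strip_ws_prefix hw]

theorem map_strip_sSplit_ws_suffix {w : List Char} (hw : ∀ c ∈ w, PySem.Chars.isspace c = true)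
    (x : List Char) : (sSplit (x ++ w)).map PySem.Chars.strip = (sSplit x).map PySem.Chars.strip := by
  have hns : ';' ∉ w := fun hmem => by
    have := hw ';' hmem
    simp [PySem.Chars.isspace] at this
  rw [sSplit_append', sSplit_of_not_mem hns]
  conv_rhs => rw [sSplit_eq_init_last x]
  simp [strip_ws_suffix hw]

theorem map_strip_sSplit_strip (t : List Char) :
    (sSplit (PySem.Chars.strip t)).map PySem.Chars.strip = (sSplit t).map PySem.Chars.strip := by
  have hdecl : t = t.takeWhile PySem.Chars.isspace ++ PySem.Chars.lstrip t :=
    (List.takeWhile_append_dropWhile).symm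
  have hw1 : ∀ c ∈ t.takeWhile PySem.Chars.isspace, PySem.Chars.isspace c = true :=
    fun c hc => List.mem_takeWhile_imp hc
  have step1 : (sSplit (PySem.Chars.lstrip t)).map PySem.Chars.strip = (sSplit t).map PySem.Chars.strip := by
    conv_rhs => rw [hdecl]
    rw [map_strip_sSplit_ws_prefix hw1]
  set u := PySem.Chars.lstrip t with hu
  have hdec2 : u = PySem.Chars.rstrip u ++ (u.reverse.takeWhile PySem.Chars.isspace).reverse := by
    rw [rstrip_eq_reverse]
    conv_lhs => rw [← List.reverse_reverse u, ← List.takeWhile_append_dropWhile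
      (p := PySem.Chars.isspace) (l := u.reverse)]
    rw [List.reverse_append]
    rfl
  have hw2 : ∀ c ∈ (u.reverse.takeWhile PySem.Chars.isspace).reverse, PySem.Chars.isspace c = true :=
    fun c hc => List.mem_takeWhile_imp (by simpa using hc)
  have step2 : (sSplit (PySem.Chars.rstrip u)).map PySem.Chars.strip = (sSplit u).map PySem.Chars.strip := by
    conv_rhs => rw [hdec2]
    rw [map_strip_sSplit_ws_suffix hw2]
  calc (sSplit (PySem.Chars.strip t)).map PySem.Chars.strip
      = (sSplit (PySem.Chars.rstrip u)).map PySem.Chars.strip := rfl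
    _ = (sSplit u).map PySem.Chars.strip := step2
    _ = (sSplit t).map PySem.Chars.strip := step1

theorem fStrip_sInit_eq {u v : List Char}
    (h : (sSplit u).map PySem.Chars.strip = (sSplit v).map PySem.Chars.strip) :
    fStrip (sInit u) = fStrip (sInit v) ∧
      PySem.Chars.strip (sLast u) = PySem.Chars.strip (sLast v) := by
  have h1 : sSplit u = sInit u ++ [sLast u] := sSplit_eq_init_last u
  have h2 : sSplit v = sInit v ++ [sLast v] := sSplit_eq_init_last v
  rw [h1, h2] at h
  simp only [List.map_append, List.map_cons, List.map_nil] at h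
  have hlen : (sInit u).length = (sInit v).length := by
    have := congrArg List.length h
    simpa using this
  have h3 := List.append_inj h (by simpa using hlen)
  constructor
  · rcases h3 with ⟨ha, -⟩
    simp [fStrip, ha]
  · rcases h3 with ⟨-, hb⟩
    simpa using hb

theorem isIn_semi (buf : List Char) : (PySem.Chars.isIn [';'] buf = true) ↔ ';' ∈ buf := by
  rw [PySem.Chars.isIn_iff_infix, List.singleton_infix_iff]

theorem semi_decomp {buf : List Char} (h : ';' ∈ buf) :
    buf = buf.takeWhile (· ≠ ';') ++ ';' :: (buf.dropWhile (· ≠ ';')).tail ∧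
      ';' ∉ buf.takeWhile (· ≠ ';') := by
  have hne : buf.dropWhile (· ≠ ';') ≠ [] := by
    intro hnil
    rw [List.dropWhile_eq_nil_iff] at hnil
    have := hnil ';' h
    simp at this
  have hhead : (buf.dropWhile (· ≠ ';')).head hne = ';' := by
    have := List.head_dropWhile_not (fun x => decide (x ≠ ';')) hne
    simpa using this
  constructor
  · conv_lhs => rw [← List.takeWhile_append_dropWhile (p := (· ≠ ';')) (l := buf)]
    congr 1
    conv_lhs => rw [← List.cons_head_tail hne]
    rw [hhead]
  · intro hmem
    have := List.mem_takeWhile_imp hmem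
    simp at this

theorem whileA_spec (fuel : Nat) : ∀ (buf : List Char) (stmts : List (List Char)),
    buf.length ≤ fuel → PySem.Chars.strip buf = buf →
    pvWhileA fuel stmts buf
      = (stmts ++ fStrip (sInit buf), PySem.Chars.strip (sLast buf)) := by
  induction fuel with
  | zero =>
      intro buf stmts hl hs
      have : buf = [] := List.eq_nil_of_length_eq_zero (Nat.le_zero.mp hl)
      subst this
      simp [pvWhileA, sInit, sLast, sSplit, fStrip]
      rfl
  | succ fuel ih =>
      intro buf stmts hl hs
      by_cases hmem : ';' ∈ buf
      · obtain ⟨hdec, hnm⟩ := semi_decomp hmem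
        set s := buf.takeWhile (· ≠ ';') with hsdef
        set t := (buf.dropWhile (· ≠ ';')).tail with htdef
        have hsplitmax : PySem.Chars.splitOnMax buf [';'] 1 = [s, t] := by
          rw [splitOnMax_one, if_pos hmem]
        have hsplit : sSplit buf = s :: sSplit t := by
          conv_lhs => rw [hdec]
          exact sSplit_split hnm t
        have hlen : t.length + s.length + 1 = buf.length := by
          conv_rhs => rw [hdec]
          simp; omega
        rw [pvWhileA]
        rw [if_pos ((isIn_semi buf).mpr hmem), hsplitmax]
        simp only []
        rw [ih (PySem.Chars.strip t) _ (by
              have := strip_length_le t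
              omega) (strip_strip t)]
        obtain ⟨hin, hla⟩ := fStrip_sInit_eq (map_strip_sSplit_strip t)
        rw [hin, hla]
        have hInit : sInit buf = s :: sInit t := by
          rw [sInit, hsplit, sSplit_eq_init_last t]
          rw [show s :: (sInit t ++ [sLast t]) = (s :: sInit t) ++ [sLast t] by simp,
            List.dropLast_concat]
        have hLast : sLast buf = sLast t := by
          rw [sLast, hsplit, sSplit_eq_init_last t]
          rw [show s :: (sInit t ++ [sLast t]) = (s :: sInit t) ++ [sLast t] by simp,
            List.getLastD_concat, sLast, sSplit_eq_init_last t, List.getLastD_concat]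
        rw [hInit, hLast, fStrip_cons]
        split_ifs with hstmt <;> simp
      · have hsp : sSplit buf = [buf] := sSplit_of_not_mem hmem
        have hInit : sInit buf = [] := by rw [sInit, hsp]; rfl
        have hLast : sLast buf = buf := by rw [sLast, hsp]; rfl
        rw [pvWhileA, if_neg (by rw [isIn_semi]; exact hmem)]
        rw [hInit, hLast, hs]
        simp [fStrip]

-- ---- fold-level reasoning ----
def comb (b f : List Char) : List Char := if b = [] then f else b ++ ' ' :: f

def step2 (st : List (List Char) × List Char) (f : List Char) : List (List Char) × List Char :=
  let buf := if st.2 = [] then f else PySem.Chars.strip (st.2 ++ ' ' :: f)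
  pvWhileA buf.length st.1 buf

def pvFinish (st : List (List Char) × List Char) : List (List Char) :=
  let tail := PySem.Chars.strip st.2
  if tail ≠ [] then st.1 ++ [tail] else st.1

theorem fold_clean : ∀ (ls : List (List Char)) (st : List (List Char) × List Char),
    List.foldl pvStepA st ls = List.foldl step2 st ((ls.map pvClean).filter (fun c => c ≠ [])) := by
  intro ls
  induction ls with
  | nil => intro st; rfl
  | cons l r ih =>
      intro st
      by_cases h : pvClean l = []
      · simp only [List.foldl_cons, List.map_cons, List.filter_cons, h]
        rw [show pvStepA st l = st by simp [pvStepA, h]]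
        simp [ih]
      · simp only [List.foldl_cons, List.map_cons, List.filter_cons]
        rw [show pvStepA st l = step2 st (pvClean l) by simp [pvStepA, step2, h]]
        simp [h, ih]

theorem foldl_comb_join : ∀ (gs : List (List Char)) (b : List Char), b ≠ [] →
    List.foldl comb b gs = PySem.Chars.join [' '] (b :: gs) := by
  intro gs
  induction gs with
  | nil => intro b hb; simp [PySem.Chars.join_singleton]
  | cons g gs ih =>
      intro b hb
      have hcb : comb b g = b ++ ' ' :: g := by simp [comb, hb]
      rw [List.foldl_cons, hcb, ih _ (by simp)]
      cases gs with
      | nil => simp [PySem.Chars.join_singleton, PySem.Chars.join_cons_cons]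
      | cons h t => simp [PySem.Chars.join_cons_cons]

theorem xstr {buf : List Char} (hbuf : PySem.Chars.strip buf = buf) (J : List Char) :
    (sSplit (buf ++ ' ' :: J)).map PySem.Chars.strip
      = (sInit buf).map PySem.Chars.strip ++
        (sSplit (if PySem.Chars.strip (sLast buf) = [] then J
                 else PySem.Chars.strip (sLast buf) ++ ' ' :: J)).map PySem.Chars.strip := by
  have hrsL : PySem.Chars.rstrip (sLast buf) = sLast buf :=
    rstrip_of_suffix (strip_fix hbuf).2 (sLast_suffix buf)
  rcases List.exists_cons_of_ne_nil (sSplit_ne_nil J) with ⟨q, qs, hq⟩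
  have hsp : sSplit (' ' :: J) = (' ' :: q) :: qs := by
    rw [show sSplit (' ' :: J) = (sSplit J).modifyHead (' ' :: ·) by simp [sSplit], hq]; rfl
  rw [sSplit_append', hsp]
  by_cases h0 : PySem.Chars.strip (sLast buf) = []
  · have hL0 : sLast buf = [] := (strip_nil_iff hrsL).mp h0
    rw [if_pos h0, hq, hL0]
    have hsq : PySem.Chars.strip (' ' :: q) = PySem.Chars.strip q :=
      strip_ws_prefix (w := [' ']) (by simp [PySem.Chars.isspace]) q
    simp [hsq]
  · rw [if_neg h0]
    set L := sLast buf with hL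
    set b1 := PySem.Chars.strip L with hb1
    have hlsL : b1 = PySem.Chars.lstrip L := strip_eq_lstrip hrsL
    have hdecL : L = L.takeWhile PySem.Chars.isspace ++ b1 := by
      rw [hlsL]
      exact (List.takeWhile_append_dropWhile).symm
    have hwsL : ∀ c ∈ L.takeWhile PySem.Chars.isspace, PySem.Chars.isspace c = true :=
      fun c hc => List.mem_takeWhile_imp hc
    have hnsb1 : ';' ∉ b1 := fun hm => not_semi_mem_sLast buf (mem_strip hm)
    have hnsb1' : ';' ∉ b1 ++ [' '] := by
      intro hm
      rcases List.mem_append.mp hm with h | h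
      · exact hnsb1 h
      · simp at h
    have hr : sSplit (b1 ++ ' ' :: J) = (b1 ++ ' ' :: q) :: qs := by
      rw [show b1 ++ ' ' :: J = (b1 ++ [' ']) ++ J by simp, sSplit_prefix hnsb1', hq]
      simp
    rw [hr]
    simp only [List.modifyHead_cons, List.map_append, List.map_cons]
    congr 2
    conv_lhs => rw [hdecL]
    rw [List.append_assoc]
    exact strip_ws_prefix hwsL _

theorem main_spec : ∀ (fs : List (List Char)), (∀ f ∈ fs, PySem.Chars.strip f = f ∧ f ≠ []) →
    ∀ (stmts : List (List Char)) (buf : List Char), PySem.Chars.strip buf = buf → ';' ∉ buf →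
    pvFinish (List.foldl step2 (stmts, buf) fs)
      = stmts ++ fStrip (sSplit (List.foldl comb buf fs)) := by
  intro fs
  induction fs with
  | nil =>
      intro _ stmts buf hs hns
      rw [List.foldl_nil, List.foldl_nil, sSplit_of_not_mem hns]
      simp only [pvFinish, fStrip, List.map_cons, List.map_nil, List.filter]
      rw [hs]
      by_cases hb : buf = [] <;> simp [hb]
  | cons f fs ih =>
      intro hfs stmts buf hs hns
      obtain ⟨hf, hfne⟩ := hfs f (by simp)
      have hfs' : ∀ g ∈ fs, PySem.Chars.strip g = g ∧ g ≠ [] := fun g hg => hfs g (by simp [hg])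
      set buf0 := comb buf f with hbuf0
      have hbuf0e : buf0 = if buf = [] then f else buf ++ ' ' :: f := by rw [hbuf0]; rfl
      have hstep : step2 (stmts, buf) f = pvWhileA buf0.length stmts buf0 := by
        by_cases hb : buf = []
        · rw [hbuf0e, if_pos hb]; simp [step2, hb]
        · rw [hbuf0e, if_neg hb]; simp only [step2, if_neg hb]
          rw [strip_glue hs hb hf hfne]
      have hstrip0 : PySem.Chars.strip buf0 = buf0 := by
        by_cases hb : buf = []
        · rw [hbuf0e, if_pos hb]; exact hf
        · rw [hbuf0e, if_neg hb]; exact strip_glue hs hb hf hfne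
      have hbuf0ne : buf0 ≠ [] := by
        rw [hbuf0e]
        by_cases hb : buf = [] <;> simp [hb, hfne]
      set b1 := PySem.Chars.strip (sLast buf0) with hb1
      have hstripb1 : PySem.Chars.strip b1 = b1 := strip_strip _
      have hnsb1 : ';' ∉ b1 := fun hm => not_semi_mem_sLast buf0 (mem_strip hm)
      rw [List.foldl_cons, hstep, whileA_spec _ _ _ le_rfl hstrip0,
        ih hfs' _ _ hstripb1 hnsb1]
      rw [List.foldl_cons, ← hbuf0]
      rw [List.append_assoc]
      congr 1
      cases fs with
      | nil =>
          rw [List.foldl_nil, List.foldl_nil, sSplit_of_not_mem hnsb1]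
          conv_rhs => rw [sSplit_eq_init_last buf0]
          rw [fStrip_append]
          congr 1
          simp only [fStrip, List.map_cons, List.map_nil, List.filter]
          rw [← hb1, hstripb1]
      | cons g gs =>
          obtain ⟨hg, hgne⟩ := hfs' g (by simp)
          have hJ : List.foldl comb buf0 (g :: gs)
              = buf0 ++ ' ' :: PySem.Chars.join [' '] (g :: gs) := by
            rw [foldl_comb_join _ _ hbuf0ne, PySem.Chars.join_cons_cons]
            simp
          have hR : List.foldl comb b1 (g :: gs)
              = if b1 = [] then PySem.Chars.join [' '] (g :: gs)
                else b1 ++ ' ' :: PySem.Chars.join [' '] (g :: gs) := by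
            by_cases hb : b1 = []
            · rw [if_pos hb, hb]
              rw [List.foldl_cons, show comb [] g = g from by simp [comb]]
              exact foldl_comb_join gs g hgne
            · rw [if_neg hb, foldl_comb_join _ _ hb, PySem.Chars.join_cons_cons]
              simp
          rw [hJ, hR]
          have hx := xstr hstrip0 (PySem.Chars.join [' '] (g :: gs))
          rw [← hb1] at hx
          have : fStrip (sSplit (buf0 ++ ' ' :: PySem.Chars.join [' '] (g :: gs)))
              = fStrip (sInit buf0) ++
                fStrip (sSplit (if b1 = [] then PySem.Chars.join [' '] (g :: gs)
                  else b1 ++ ' ' :: PySem.Chars.join [' '] (g :: gs))) := by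
            simp only [fStrip]
            rw [hx]
            by_cases hb : b1 = [] <;> simp [hb, List.filter_append]
          rw [this]

theorem ports_agree (lines : List String) :
    collect_statements_py lines = collect_statements_py_alt lines := by
  have hmm : (lines.map String.toList).map pvClean = lines.map (fun l => pvClean l.toList) := by
    rw [List.map_map]; rfl
  show (pvFinish ((lines.map String.toList).foldl pvStepA ([], []))).map String.ofList = _
  rw [fold_clean, hmm]
  set frags := (lines.map (fun l => pvClean l.toList)).filter (fun c => c ≠ []) with hfr
  have hprops : ∀ f ∈ frags, PySem.Chars.strip f = f ∧ f ≠ [] := by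
    intro f hf
    rw [hfr] at hf
    have h2 := List.of_mem_filter hf
    have h1 := List.mem_of_mem_filter hf
    rcases List.mem_map.mp h1 with ⟨x, -, rfl⟩
    exact ⟨strip_strip _, by simpa using h2⟩
  rw [main_spec frags hprops [] [] rfl (by simp)]
  have hjoin : List.foldl comb [] frags = PySem.Chars.join [' '] frags := by
    cases hc : frags with
    | nil => simp [PySem.Chars.join_nil]
    | cons g gs =>
        have hgne : g ≠ [] := (hprops g (by simp [hc])).2
        rw [List.foldl_cons, show comb [] g = g from by simp [comb], foldl_comb_join gs g hgne]
  rw [List.nil_append, hjoin]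
  show _ = (fStrip (PySem.Chars.splitOn (PySem.Chars.join [' '] frags) [';'])).map String.ofList
  rw [splitOn_semi]

-- ===== VERDICT (by name: the statement is the Claim_ definition above) =====
theorem collect_statements_py_spec : Claim_equal_collect_statements_py := by
  intro lines _
  unfold Spec_collect_statements_py
  exact ports_agree lines
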